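-- pv_equiv track=rewrite | github.com/James-Kai-He/CS3243-Introduction-to-Artificial-Intelligence | Project 1.2/Code/A-StarV4.py | enhanced_heuristic
-- ===== SOURCE A (Python) =====
-- from typing import List, Dict, Tuple
--
-- def enhanced_heuristic(pos: Tuple[int, int], goals: set, creeps: Dict[Tuple[int, int], int], obstacles: set, flash_left: int) -> int:
--     manhattan_dist = min(abs(pos[0] - g[0]) + abs(pos[1] - g[1]) for g in goals)
--     creep_penalty = 0
--     for goal in goals:
--         x_diff = goal[0] - pos[0]
--         y_diff = goal[1] - pos[1]
--         if x_diff == 0 or y_diff == 0: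
--             for i in range(min(pos[0], goal[0]), max(pos[0], goal[0]) + 1):
--                 for j in range(min(pos[1], goal[1]), max(pos[1], goal[1]) + 1):
--                     if (i, j) in creeps:
--                         creep_penalty += creeps[(i, j)]
--     flash_savings = 0
--     if flash_left > 0:
--         flash_savings = 8
--     return manhattan_dist + creep_penalty - flash_savings
-- ===== SOURCE B (Python) =====
-- def enhanced_heuristic(pos, goals, creeps, obstacles, flash_left):
--     manhattan_dist = min(abs(pos[0] - g[0]) + abs(pos[1] - g[1]) for g in goals)
--     creep_penalty = 0
--     for (i, j), v in creeps.items():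
--         for goal in goals:
--             if (goal[0] == pos[0] or goal[1] == pos[1]) \
--                and min(pos[0], goal[0]) <= i <= max(pos[0], goal[0]) \
--                and min(pos[1], goal[1]) <= j <= max(pos[1], goal[1]):
--                 creep_penalty += v
--     return manhattan_dist + creep_penalty - (8 if flash_left > 0 else 0)
-- ===== Notes on version B (the rewrite author's own statement) =====
-- stated objective: faster
-- what changed: A walks every grid cell of the axis-aligned rectangle between pos and each aligned goal and looks each cell up in the creep dict; B makes one pass over the sparse creep dict entries and adds each creep's value once per aligned goal whose pos-goal segment contains it (inclusive bounds test), so the cost no longer depends on the board area.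
import Mathlib
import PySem

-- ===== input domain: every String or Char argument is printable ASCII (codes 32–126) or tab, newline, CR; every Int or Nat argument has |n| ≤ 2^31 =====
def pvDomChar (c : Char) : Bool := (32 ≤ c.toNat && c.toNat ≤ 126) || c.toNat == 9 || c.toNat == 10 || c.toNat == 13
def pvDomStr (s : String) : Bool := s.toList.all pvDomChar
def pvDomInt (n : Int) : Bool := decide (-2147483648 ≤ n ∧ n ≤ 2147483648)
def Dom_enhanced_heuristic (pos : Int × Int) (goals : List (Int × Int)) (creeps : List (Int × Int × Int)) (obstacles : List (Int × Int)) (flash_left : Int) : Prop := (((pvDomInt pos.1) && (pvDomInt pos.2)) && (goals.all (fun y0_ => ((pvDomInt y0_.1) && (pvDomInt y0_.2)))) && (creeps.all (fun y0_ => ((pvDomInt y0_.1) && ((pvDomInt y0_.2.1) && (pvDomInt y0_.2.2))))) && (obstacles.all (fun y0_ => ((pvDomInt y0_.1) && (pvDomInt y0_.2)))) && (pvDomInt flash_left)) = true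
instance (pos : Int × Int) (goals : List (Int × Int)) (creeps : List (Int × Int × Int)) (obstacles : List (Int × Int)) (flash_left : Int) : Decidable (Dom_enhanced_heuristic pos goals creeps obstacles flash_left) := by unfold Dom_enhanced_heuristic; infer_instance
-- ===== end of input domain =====

-- B replaces A's walk over every grid cell between pos and each aligned goal by a single
-- pass over the sparse creep dictionary with an inclusive containment test per goal
-- (objective: faster — O(|creeps|·|goals|) instead of O(area·|goals|)).

-- ===== PORT A =====
def enhanced_heuristic (pos : Int × Int) (goals : List (Int × Int)) (creeps : List (Int × Int × Int)) (obstacles : List (Int × Int)) (flash_left : Int) : Int :=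
  -- creeps is the dict's items (i, j, v) in insertion order; lookup is PySem.Dict on key (i, j)
  let manhattan_dist : Int :=
    (PySem.List.min? (goals.map (fun g => |pos.1 - g.1| + |pos.2 - g.2|)) (fun x => x)).getD 0
  let creep_penalty : Int :=
    goals.foldl (fun acc goal =>
      if goal.1 - pos.1 = 0 ∨ goal.2 - pos.2 = 0 then
        (PySem.List.pyRange (min pos.1 goal.1) (max pos.1 goal.1 + 1) 1).foldl (fun acc i =>
          (PySem.List.pyRange (min pos.2 goal.2) (max pos.2 goal.2 + 1) 1).foldl (fun acc j =>
            match (PySem.Dict.mk (creeps.map (fun c => ((c.1, c.2.1), c.2.2)))).get? (i, j) with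
            | some v => acc + v
            | none => acc) acc) acc
      else acc) 0
  let flash_savings : Int := if flash_left > 0 then 8 else 0
  manhattan_dist + creep_penalty - flash_savings

-- ===== PORT B =====
def enhanced_heuristic_alt (pos : Int × Int) (goals : List (Int × Int)) (creeps : List (Int × Int × Int)) (obstacles : List (Int × Int)) (flash_left : Int) : Int :=
  let manhattan_dist : Int :=
    (PySem.List.min? (goals.map (fun g => |pos.1 - g.1| + |pos.2 - g.2|)) (fun x => x)).getD 0
  let creep_penalty : Int :=
    creeps.foldl (fun acc c =>
      goals.foldl (fun acc goal =>
        if (goal.1 = pos.1 ∨ goal.2 = pos.2) ∧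
           min pos.1 goal.1 ≤ c.1 ∧ c.1 ≤ max pos.1 goal.1 ∧
           min pos.2 goal.2 ≤ c.2.1 ∧ c.2.1 ≤ max pos.2 goal.2
        then acc + c.2.2 else acc) acc) 0
  manhattan_dist + creep_penalty - (if flash_left > 0 then 8 else 0)

-- ===== PRECONDITION & SPEC =====
-- Pre_ excludes empty goal sets (A's min(...) raises ValueError there) and creep lists whose
-- keys (i, j) repeat — creeps is a Python dict, whose association list always has distinct keys.
def Pre_enhanced_heuristic (pos : Int × Int) (goals : List (Int × Int)) (creeps : List (Int × Int × Int)) (obstacles : List (Int × Int)) (flash_left : Int) : Prop :=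
  goals ≠ [] ∧ (creeps.map (fun c => (c.1, c.2.1))).Nodup
instance (pos : Int × Int) (goals : List (Int × Int)) (creeps : List (Int × Int × Int)) (obstacles : List (Int × Int)) (flash_left : Int) : Decidable (Pre_enhanced_heuristic pos goals creeps obstacles flash_left) := by unfold Pre_enhanced_heuristic; infer_instance
def pvWitness_enhanced_heuristic : (Int × Int) × (List (Int × Int)) × (List (Int × Int × Int)) × (List (Int × Int)) × Int :=
  ((0, 0), [(0, 2)], [(0, 1, 3)], [], 0)
def Spec_enhanced_heuristic (pos : Int × Int) (goals : List (Int × Int)) (creeps : List (Int × Int × Int)) (obstacles : List (Int × Int)) (flash_left : Int) (out : Int) : Prop := out = enhanced_heuristic_alt pos goals creeps obstacles flash_left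
instance (pos : Int × Int) (goals : List (Int × Int)) (creeps : List (Int × Int × Int)) (obstacles : List (Int × Int)) (flash_left : Int) (out : Int) : Decidable (Spec_enhanced_heuristic pos goals creeps obstacles flash_left out) := by unfold Spec_enhanced_heuristic; infer_instance

-- ===== CLAIM (what is proved, stated in full; the proofs are below) =====
def Claim_equal_enhanced_heuristic : Prop := ∀ (pos : Int × Int) (goals : List (Int × Int)) (creeps : List (Int × Int × Int)) (obstacles : List (Int × Int)) (flash_left : Int), Dom_enhanced_heuristic pos goals creeps obstacles flash_left → Pre_enhanced_heuristic pos goals creeps obstacles flash_left → Spec_enhanced_heuristic pos goals creeps obstacles flash_left (enhanced_heuristic pos goals creeps obstacles flash_left)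

-- ===== LEMMAS AND PROOFS =====

-- the value A adds at a grid cell: the dict value there, or 0 when the cell holds no creep
def pvLk (creeps : List (Int × Int × Int)) (cell : Int × Int) : Int :=
  ((PySem.Dict.mk (creeps.map (fun c => ((c.1, c.2.1), c.2.2)))).get? cell).getD 0

-- swap a double list sum
theorem pv_sum_comm {α β : Type} (l : List α) (m : List β) (f : α → β → Int) :
    (l.map (fun x => (m.map (fun y => f x y)).sum)).sum
      = (m.map (fun y => (l.map (fun x => f x y)).sum)).sum := by
  induction l with
  | nil => simp
  | cons a t ih => simp [List.sum_map_add, ih]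

-- a guarded accumulating loop is the sum of its guarded contributions
theorem pv_foldl_if_add {α : Type} (l : List α) (p : α → Prop) [DecidablePred p] (g : α → Int) (a : Int) :
    l.foldl (fun acc x => if p x then acc + g x else acc) a
      = a + (l.map (fun x => if p x then g x else 0)).sum := by
  induction l generalizing a with
  | nil => simp
  | cons x t ih => simp only [List.foldl_cons, List.map_cons, List.sum_cons, ih]; split <;> ring

-- indicator sum over a duplicate-free list of coordinates
theorem pv_sum_ite_eq (l : List Int) (hl : l.Nodup) (k v : Int) :
    (l.map (fun x => if k = x then v else 0)).sum = if k ∈ l then v else 0 := by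
  induction l with
  | nil => simp
  | cons x t ih =>
    rcases List.nodup_cons.mp hl with ⟨hx, ht⟩
    by_cases hk : k = x
    · subst hk
      have h0 : (t.map (fun x => if k = x then v else 0)).sum = 0 := by
        apply List.sum_eq_zero
        intro y hy
        rcases List.mem_map.mp hy with ⟨z, hz, rfl⟩
        exact if_neg (fun h => hx (by rw [h]; exact hz))
      simp [h0]
    · simp [hk, ih ht]

-- with distinct keys, the dict value at a cell is the sum of matching entries
theorem pv_lk_eq_sum (creeps : List (Int × Int × Int))
    (hnd : (creeps.map (fun c => (c.1, c.2.1))).Nodup) (cell : Int × Int) :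
    pvLk creeps cell = (creeps.map (fun c => if (c.1, c.2.1) = cell then c.2.2 else 0)).sum := by
  induction creeps with
  | nil => simp [pvLk, PySem.Dict.get?]
  | cons c t ih =>
    rw [List.map_cons] at hnd
    rcases List.nodup_cons.mp hnd with ⟨hc, ht⟩
    by_cases hk : (c.1, c.2.1) = cell
    · have h0 : (t.map (fun c' => if (c'.1, c'.2.1) = cell then c'.2.2 else 0)).sum = 0 := by
        apply List.sum_eq_zero
        intro y hy
        rcases List.mem_map.mp hy with ⟨z, hz, rfl⟩
        exact if_neg (fun h => hc (List.mem_map.mpr ⟨z, hz, by rw [h, ← hk]⟩))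
      simp [pvLk, PySem.Dict.get?_mk_cons, hk, h0]
    · have hstep : pvLk (c :: t) cell = pvLk t cell := by
        simp [pvLk, PySem.Dict.get?_mk_cons, hk]
      rw [hstep, ih ht]
      simp [hk]

-- the rectangle walk between pos and goal totals, per creep, its value if it is contained
theorem pv_seg_sum (creeps : List (Int × Int × Int))
    (hnd : (creeps.map (fun c => (c.1, c.2.1))).Nodup) (a b c d : Int) :
    ((PySem.List.pyRange a (b + 1) 1).map (fun i =>
      ((PySem.List.pyRange c (d + 1) 1).map (fun j => pvLk creeps (i, j))).sum)).sum
    = (creeps.map (fun cr => if a ≤ cr.1 ∧ cr.1 ≤ b ∧ c ≤ cr.2.1 ∧ cr.2.1 ≤ d then cr.2.2 else 0)).sum := by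
  have h1 : ∀ i : Int, ((PySem.List.pyRange c (d + 1) 1).map (fun j => pvLk creeps (i, j))).sum
      = (creeps.map (fun cr => if cr.1 = i ∧ c ≤ cr.2.1 ∧ cr.2.1 ≤ d then cr.2.2 else 0)).sum := by
    intro i
    calc ((PySem.List.pyRange c (d + 1) 1).map (fun j => pvLk creeps (i, j))).sum
        = ((PySem.List.pyRange c (d + 1) 1).map (fun j =>
            (creeps.map (fun cr => if (cr.1, cr.2.1) = (i, j) then cr.2.2 else 0)).sum)).sum :=
          congrArg List.sum (List.map_congr_left (fun j _ => pv_lk_eq_sum creeps hnd (i, j)))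
      _ = (creeps.map (fun cr =>
            ((PySem.List.pyRange c (d + 1) 1).map (fun j => if (cr.1, cr.2.1) = (i, j) then cr.2.2 else 0)).sum)).sum :=
          pv_sum_comm _ _ _
      _ = (creeps.map (fun cr => if cr.1 = i ∧ c ≤ cr.2.1 ∧ cr.2.1 ≤ d then cr.2.2 else 0)).sum := by
          refine congrArg List.sum (List.map_congr_left ?_)
          intro cr _
          by_cases hcr : cr.1 = i
          · have hfun : ∀ j ∈ PySem.List.pyRange c (d + 1) 1,
                (if (cr.1, cr.2.1) = (i, j) then cr.2.2 else 0) = (if cr.2.1 = j then cr.2.2 else 0) :=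
              fun j _ => if_congr (by simp [Prod.ext_iff, hcr]) rfl rfl
            calc ((PySem.List.pyRange c (d + 1) 1).map (fun j => if (cr.1, cr.2.1) = (i, j) then cr.2.2 else 0)).sum
                = ((PySem.List.pyRange c (d + 1) 1).map (fun j => if cr.2.1 = j then cr.2.2 else 0)).sum :=
                  congrArg List.sum (List.map_congr_left hfun)
              _ = (if cr.2.1 ∈ PySem.List.pyRange c (d + 1) 1 then cr.2.2 else 0) :=
                  pv_sum_ite_eq _ (PySem.List.nodup_pyRange_one _ _) _ _
              _ = (if cr.1 = i ∧ c ≤ cr.2.1 ∧ cr.2.1 ≤ d then cr.2.2 else 0) := by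
                  simp only [PySem.List.mem_pyRange_one]
                  exact if_congr (by constructor <;> intro h <;> [exact ⟨hcr, by omega⟩; omega]) rfl rfl
          · have hfun : ∀ j ∈ PySem.List.pyRange c (d + 1) 1,
                (if (cr.1, cr.2.1) = (i, j) then cr.2.2 else 0) = (0 : Int) :=
              fun j _ => if_neg (by simp [Prod.ext_iff, hcr])
            rw [List.map_congr_left hfun, if_neg (fun h => hcr h.1)]
            simp
  calc ((PySem.List.pyRange a (b + 1) 1).map (fun i =>
          ((PySem.List.pyRange c (d + 1) 1).map (fun j => pvLk creeps (i, j))).sum)).sum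
      = ((PySem.List.pyRange a (b + 1) 1).map (fun i =>
          (creeps.map (fun cr => if cr.1 = i ∧ c ≤ cr.2.1 ∧ cr.2.1 ≤ d then cr.2.2 else 0)).sum)).sum :=
        congrArg List.sum (List.map_congr_left (fun i _ => h1 i))
    _ = (creeps.map (fun cr =>
          ((PySem.List.pyRange a (b + 1) 1).map (fun i => if cr.1 = i ∧ c ≤ cr.2.1 ∧ cr.2.1 ≤ d then cr.2.2 else 0)).sum)).sum :=
        pv_sum_comm _ _ _
    _ = (creeps.map (fun cr => if a ≤ cr.1 ∧ cr.1 ≤ b ∧ c ≤ cr.2.1 ∧ cr.2.1 ≤ d then cr.2.2 else 0)).sum := by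
        refine congrArg List.sum (List.map_congr_left ?_)
        intro cr _
        by_cases hq : c ≤ cr.2.1 ∧ cr.2.1 ≤ d
        · have hfun : ∀ i ∈ PySem.List.pyRange a (b + 1) 1,
              (if cr.1 = i ∧ c ≤ cr.2.1 ∧ cr.2.1 ≤ d then cr.2.2 else 0) = (if cr.1 = i then cr.2.2 else 0) :=
            fun i _ => if_congr (by simp [hq]) rfl rfl
          calc ((PySem.List.pyRange a (b + 1) 1).map (fun i => if cr.1 = i ∧ c ≤ cr.2.1 ∧ cr.2.1 ≤ d then cr.2.2 else 0)).sum
              = ((PySem.List.pyRange a (b + 1) 1).map (fun i => if cr.1 = i then cr.2.2 else 0)).sum :=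
                congrArg List.sum (List.map_congr_left hfun)
            _ = (if cr.1 ∈ PySem.List.pyRange a (b + 1) 1 then cr.2.2 else 0) :=
                pv_sum_ite_eq _ (PySem.List.nodup_pyRange_one _ _) _ _
            _ = (if a ≤ cr.1 ∧ cr.1 ≤ b ∧ c ≤ cr.2.1 ∧ cr.2.1 ≤ d then cr.2.2 else 0) := by
                simp only [PySem.List.mem_pyRange_one]
                exact if_congr (by constructor <;> intro h <;> [exact ⟨h.1, by omega, hq⟩; omega]) rfl rfl
        · have hfun : ∀ i ∈ PySem.List.pyRange a (b + 1) 1,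
              (if cr.1 = i ∧ c ≤ cr.2.1 ∧ cr.2.1 ≤ d then cr.2.2 else 0) = (0 : Int) :=
            fun i _ => if_neg (fun h => hq h.2)
          rw [List.map_congr_left hfun, if_neg (fun h => hq ⟨h.2.2.1, h.2.2.2⟩)]
          simp

-- the two creep-penalty loops agree
theorem pv_penalty_eq (pos : Int × Int) (goals : List (Int × Int)) (creeps : List (Int × Int × Int))
    (hnd : (creeps.map (fun c => (c.1, c.2.1))).Nodup) :
    goals.foldl (fun acc goal =>
      if goal.1 - pos.1 = 0 ∨ goal.2 - pos.2 = 0 then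
        (PySem.List.pyRange (min pos.1 goal.1) (max pos.1 goal.1 + 1) 1).foldl (fun acc i =>
          (PySem.List.pyRange (min pos.2 goal.2) (max pos.2 goal.2 + 1) 1).foldl (fun acc j =>
            match (PySem.Dict.mk (creeps.map (fun c => ((c.1, c.2.1), c.2.2)))).get? (i, j) with
            | some v => acc + v
            | none => acc) acc) acc
      else acc) 0
    = creeps.foldl (fun acc c =>
        goals.foldl (fun acc goal =>
          if (goal.1 = pos.1 ∨ goal.2 = pos.2) ∧
             min pos.1 goal.1 ≤ c.1 ∧ c.1 ≤ max pos.1 goal.1 ∧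
             min pos.2 goal.2 ≤ c.2.1 ∧ c.2.1 ≤ max pos.2 goal.2
          then acc + c.2.2 else acc) acc) 0 := by
  have hA : ∀ (acc : Int), ∀ goal ∈ goals,
      (if goal.1 - pos.1 = 0 ∨ goal.2 - pos.2 = 0 then
        (PySem.List.pyRange (min pos.1 goal.1) (max pos.1 goal.1 + 1) 1).foldl (fun acc i =>
          (PySem.List.pyRange (min pos.2 goal.2) (max pos.2 goal.2 + 1) 1).foldl (fun acc j =>
            match (PySem.Dict.mk (creeps.map (fun c => ((c.1, c.2.1), c.2.2)))).get? (i, j) with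
            | some v => acc + v
            | none => acc) acc) acc
      else acc)
      = (if goal.1 - pos.1 = 0 ∨ goal.2 - pos.2 = 0 then
          acc + (creeps.map (fun cr =>
            if min pos.1 goal.1 ≤ cr.1 ∧ cr.1 ≤ max pos.1 goal.1 ∧
               min pos.2 goal.2 ≤ cr.2.1 ∧ cr.2.1 ≤ max pos.2 goal.2 then cr.2.2 else 0)).sum
        else acc) := by
    intro acc goal _
    by_cases hP : goal.1 - pos.1 = 0 ∨ goal.2 - pos.2 = 0
    · rw [if_pos hP, if_pos hP]
      have hji : ∀ (a i : Int),
          (PySem.List.pyRange (min pos.2 goal.2) (max pos.2 goal.2 + 1) 1).foldl (fun acc j =>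
            match (PySem.Dict.mk (creeps.map (fun c => ((c.1, c.2.1), c.2.2)))).get? (i, j) with
            | some v => acc + v
            | none => acc) a
          = a + ((PySem.List.pyRange (min pos.2 goal.2) (max pos.2 goal.2 + 1) 1).map
              (fun j => pvLk creeps (i, j))).sum := by
        intro a i
        exact (PySem.List.foldl_congr_mem _ _ (fun acc j => acc + pvLk creeps (i, j)) _
          (by intro a' j _
              cases h : (PySem.Dict.mk (creeps.map (fun c => ((c.1, c.2.1), c.2.2)))).get? (i, j) <;>
                simp [pvLk, h])).trans (PySem.List.foldl_add _ _ _)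
      exact (PySem.List.foldl_congr_mem _ _
          (fun acc i => acc + ((PySem.List.pyRange (min pos.2 goal.2) (max pos.2 goal.2 + 1) 1).map
            (fun j => pvLk creeps (i, j))).sum) _
          (fun a i _ => hji a i)).trans
        ((PySem.List.foldl_add _ _ _).trans
          (congrArg (fun t => acc + t) (pv_seg_sum creeps hnd _ _ _ _)))
    · rw [if_neg hP, if_neg hP]
  calc goals.foldl (fun acc goal =>
        if goal.1 - pos.1 = 0 ∨ goal.2 - pos.2 = 0 then
          (PySem.List.pyRange (min pos.1 goal.1) (max pos.1 goal.1 + 1) 1).foldl (fun acc i =>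
            (PySem.List.pyRange (min pos.2 goal.2) (max pos.2 goal.2 + 1) 1).foldl (fun acc j =>
              match (PySem.Dict.mk (creeps.map (fun c => ((c.1, c.2.1), c.2.2)))).get? (i, j) with
              | some v => acc + v
              | none => acc) acc) acc
        else acc) 0
      = goals.foldl (fun acc goal =>
          if goal.1 - pos.1 = 0 ∨ goal.2 - pos.2 = 0 then
            acc + (creeps.map (fun cr =>
              if min pos.1 goal.1 ≤ cr.1 ∧ cr.1 ≤ max pos.1 goal.1 ∧
                 min pos.2 goal.2 ≤ cr.2.1 ∧ cr.2.1 ≤ max pos.2 goal.2 then cr.2.2 else 0)).sum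
          else acc) 0 := PySem.List.foldl_congr_mem _ _ _ _ hA
    _ = 0 + (goals.map (fun goal =>
          if goal.1 - pos.1 = 0 ∨ goal.2 - pos.2 = 0 then
            (creeps.map (fun cr =>
              if min pos.1 goal.1 ≤ cr.1 ∧ cr.1 ≤ max pos.1 goal.1 ∧
                 min pos.2 goal.2 ≤ cr.2.1 ∧ cr.2.1 ≤ max pos.2 goal.2 then cr.2.2 else 0)).sum
          else 0)).sum := pv_foldl_if_add goals _ _ 0
    _ = (goals.map (fun goal =>
          (creeps.map (fun cr =>
            if (goal.1 - pos.1 = 0 ∨ goal.2 - pos.2 = 0) ∧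
               min pos.1 goal.1 ≤ cr.1 ∧ cr.1 ≤ max pos.1 goal.1 ∧
               min pos.2 goal.2 ≤ cr.2.1 ∧ cr.2.1 ≤ max pos.2 goal.2 then cr.2.2 else 0)).sum)).sum := by
        rw [zero_add]
        refine congrArg List.sum (List.map_congr_left ?_)
        intro goal _
        by_cases hP : goal.1 - pos.1 = 0 ∨ goal.2 - pos.2 = 0
        · rw [if_pos hP]
          refine congrArg List.sum (List.map_congr_left ?_)
          intro cr _
          exact if_congr (by constructor <;> intro h <;> [exact ⟨hP, h⟩; exact h.2]) rfl rfl
        · rw [if_neg hP]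
          exact (List.sum_eq_zero (by
            intro x hx
            rcases List.mem_map.mp hx with ⟨cr, _, rfl⟩
            exact if_neg (fun h => hP h.1))).symm
    _ = (creeps.map (fun cr =>
          (goals.map (fun goal =>
            if (goal.1 - pos.1 = 0 ∨ goal.2 - pos.2 = 0) ∧
               min pos.1 goal.1 ≤ cr.1 ∧ cr.1 ≤ max pos.1 goal.1 ∧
               min pos.2 goal.2 ≤ cr.2.1 ∧ cr.2.1 ≤ max pos.2 goal.2 then cr.2.2 else 0)).sum)).sum :=
        pv_sum_comm _ _ _
    _ = (creeps.map (fun cr =>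
          (goals.map (fun goal =>
            if (goal.1 = pos.1 ∨ goal.2 = pos.2) ∧
               min pos.1 goal.1 ≤ cr.1 ∧ cr.1 ≤ max pos.1 goal.1 ∧
               min pos.2 goal.2 ≤ cr.2.1 ∧ cr.2.1 ≤ max pos.2 goal.2 then cr.2.2 else 0)).sum)).sum := by
        refine congrArg List.sum (List.map_congr_left ?_)
        intro cr _
        refine congrArg List.sum (List.map_congr_left ?_)
        intro goal _
        exact if_congr (by constructor <;> intro h <;> exact ⟨by omega, h.2⟩) rfl rfl
    _ = 0 + (creeps.map (fun cr =>
          (goals.map (fun goal =>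
            if (goal.1 = pos.1 ∨ goal.2 = pos.2) ∧
               min pos.1 goal.1 ≤ cr.1 ∧ cr.1 ≤ max pos.1 goal.1 ∧
               min pos.2 goal.2 ≤ cr.2.1 ∧ cr.2.1 ≤ max pos.2 goal.2 then cr.2.2 else 0)).sum)).sum :=
        (zero_add _).symm
    _ = creeps.foldl (fun acc c =>
          acc + (goals.map (fun goal =>
            if (goal.1 = pos.1 ∨ goal.2 = pos.2) ∧
               min pos.1 goal.1 ≤ c.1 ∧ c.1 ≤ max pos.1 goal.1 ∧
               min pos.2 goal.2 ≤ c.2.1 ∧ c.2.1 ≤ max pos.2 goal.2 then c.2.2 else 0)).sum) 0 :=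
        (PySem.List.foldl_add _ _ _).symm
    _ = creeps.foldl (fun acc c =>
          goals.foldl (fun acc goal =>
            if (goal.1 = pos.1 ∨ goal.2 = pos.2) ∧
               min pos.1 goal.1 ≤ c.1 ∧ c.1 ≤ max pos.1 goal.1 ∧
               min pos.2 goal.2 ≤ c.2.1 ∧ c.2.1 ≤ max pos.2 goal.2
            then acc + c.2.2 else acc) acc) 0 :=
        PySem.List.foldl_congr_mem _ _ _ _
          (fun acc c _ => (pv_foldl_if_add goals _ (fun _ => c.2.2) acc).symm)

-- ===== VERDICT (by name: the statement is the Claim_ definition above) =====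
theorem enhanced_heuristic_spec : Claim_equal_enhanced_heuristic := by
  intro pos goals creeps obstacles flash_left _hdom hpre
  unfold Spec_enhanced_heuristic
  simp only [enhanced_heuristic, enhanced_heuristic_alt]
  rw [pv_penalty_eq pos goals creeps hpre.2]
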